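-- pv_equiv track=rewrite | github.com/SuperSat001/CS762-Project | ckpt-1/vdf_simulation.py | find_a_h_a_patterns
-- ===== SOURCE A (Python) =====
-- from typing import Dict, List, Sequence, Tuple
--
-- def find_a_h_a_patterns(tail: str, head: str) -> List[Tuple[int, int, int, int]]:
--     """Find patterns start_idx, a1, h, a2 in tail+head where pattern starts with A^a1 H^h A^a2."""
--     x = tail + head
--     n_tail = len(tail)
--     out: List[Tuple[int, int, int, int]] = []
--     i = 0
--     while i < n_tail:
--         if x[i] != "A":
--             i += 1
--             continue
--         j = i
--         while j < len(x) and x[j] == "A":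
--             j += 1
--         a1 = j - i
--         k = j
--         while k < len(x) and x[k] == "H":
--             k += 1
--         h = k - j
--         if h == 0:
--             i = j
--             continue
--         l = k
--         while l < len(x) and x[l] == "A":
--             l += 1
--         a2 = l - k
--         if a2 > 0:
--             out.append((i, a1, h, a2))
--         i = j
--     return out
-- ===== SOURCE B (Python) =====
-- from typing import List, Tuple
--
-- def find_a_h_a_patterns(tail: str, head: str) -> List[Tuple[int, int, int, int]]:
--     """Find patterns start_idx, a1, h, a2 in tail+head where pattern starts with A^a1 H^h A^a2."""
--     x = tail + head
--     n_tail = len(tail)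
--     # one pass: run-length encode x into (char, start, length) triples
--     runs: List[Tuple[str, int, int]] = []
--     pos = 0
--     while pos < len(x):
--         c = x[pos]
--         rl = 1
--         while pos + rl < len(x) and x[pos + rl] == c:
--             rl += 1
--         runs.append((c, pos, rl))
--         pos += rl
--     # scan consecutive run triples
--     out: List[Tuple[int, int, int, int]] = []
--     for k in range(len(runs)):
--         c1, s1, l1 = runs[k]
--         if c1 == "A" and s1 < n_tail and k + 2 < len(runs) and runs[k + 1][0] == "H" and runs[k + 2][0] == "A":
--             out.append((s1, l1, runs[k + 1][2], runs[k + 2][2]))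
--     return out
-- ===== Notes on version B (the rewrite author's own statement) =====
-- stated objective: alternative
-- what changed: B first run-length-encodes tail+head into (char, start, length) triples in one pass, then finds the A^a1 H^h A^a2 patterns by scanning consecutive run triples, replacing A's per-position outer loop with nested character-skipping while loops.
import Mathlib
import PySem

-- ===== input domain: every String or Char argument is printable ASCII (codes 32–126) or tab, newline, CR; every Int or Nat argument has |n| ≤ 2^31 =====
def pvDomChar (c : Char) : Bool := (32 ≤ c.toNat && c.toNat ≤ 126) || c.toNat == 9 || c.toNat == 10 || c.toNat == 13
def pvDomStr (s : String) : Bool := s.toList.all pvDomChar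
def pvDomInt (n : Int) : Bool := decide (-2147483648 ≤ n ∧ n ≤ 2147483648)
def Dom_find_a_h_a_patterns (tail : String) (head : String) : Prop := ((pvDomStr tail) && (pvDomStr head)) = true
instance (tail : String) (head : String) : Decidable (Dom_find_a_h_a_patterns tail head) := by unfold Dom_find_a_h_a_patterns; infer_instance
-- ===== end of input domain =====

-- B replaces A's per-pattern nested while-scans by one run-length-encoding pass plus a scan of
-- consecutive run triples (objective: alternative decomposition, same asymptotic cost).

-- ===== PORT A =====

-- while j < len(x) and x[j] == c: j += 1   (returns the final j)
def pvSkip (c : Char) (x : List Char) (j : Nat) : Nat :=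
  if h : j < x.length ∧ x.getD j ' ' = c then pvSkip c x (j + 1) else j
termination_by x.length - j
decreasing_by exact Nat.sub_succ_lt_self _ _ h.1

theorem pvSkip_ge (c : Char) (x : List Char) (j : Nat) : j ≤ pvSkip c x j := by
  fun_induction pvSkip with
  | case1 j h ih => omega
  | case2 j h => omega

theorem pvSkip_step (c : Char) (x : List Char) (p : Nat)
    (h1 : p < x.length) (h2 : x.getD p ' ' = c) :
    pvSkip c x p = pvSkip c x (p + 1) := by
  conv_lhs => rw [pvSkip]
  rw [dif_pos ⟨h1, h2⟩]

-- the outer while loop of A, state i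
def pvLoopA (x : List Char) (ntail : Nat) (i : Nat) : List (Int × Int × Int × Int) :=
  if hi : i < ntail then
    if hA : x.getD i ' ' ≠ 'A' then pvLoopA x ntail (i + 1)
    else
      let j := pvSkip 'A' x i
      have hij : i < j :=
        have hil : i < x.length := by
          by_contra hc
          apply hA
          rw [List.getD_eq_default _ _ (Nat.le_of_not_lt hc)]
          decide
        Nat.lt_of_lt_of_le (Nat.lt_succ_self i)
          (le_of_le_of_eq (pvSkip_ge 'A' x (i + 1)) (pvSkip_step 'A' x i hil (not_not.mp hA)).symm)
      let a1 := j - i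
      let k := pvSkip 'H' x j
      let h := k - j
      if h = 0 then pvLoopA x ntail j
      else
        let l := pvSkip 'A' x k
        let a2 := l - k
        (if a2 > 0 then [((i : Int), (a1 : Int), (h : Int), (a2 : Int))] else []) ++ pvLoopA x ntail j
  else []
termination_by ntail - i
decreasing_by · exact Nat.sub_succ_lt_self _ _ hi
              · exact Nat.sub_lt_sub_left hi hij
              · exact Nat.sub_lt_sub_left hi hij

def find_a_h_a_patterns (tail : String) (head : String) : List (Int × Int × Int × Int) :=
  pvLoopA (tail.toList ++ head.toList) tail.toList.length 0

-- ===== PORT B =====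

-- inner while of the RLE pass: rl = 1; while pos+rl < len(x) and x[pos+rl] == c: rl += 1
def pvRunLen (x : List Char) (c : Char) (pos : Nat) (rl : Nat) : Nat :=
  if h : pos + rl < x.length ∧ x.getD (pos + rl) ' ' = c then pvRunLen x c pos (rl + 1) else rl
termination_by x.length - (pos + rl)
decreasing_by exact Nat.sub_succ_lt_self _ _ h.1

theorem pvRunLen_ge (x : List Char) (c : Char) (pos rl : Nat) : rl ≤ pvRunLen x c pos rl := by
  fun_induction pvRunLen with
  | case1 rl h ih => omega
  | case2 rl h => omega

-- the RLE pass of B: maximal runs of x from position pos, as (char, start, length)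
def pvRuns (x : List Char) (pos : Nat) : List (Char × Nat × Nat) :=
  if hp : pos < x.length then
    (x.getD pos ' ', pos, pvRunLen x (x.getD pos ' ') pos 1) ::
      pvRuns x (pos + pvRunLen x (x.getD pos ' ') pos 1)
  else []
termination_by x.length - pos
decreasing_by
  exact Nat.sub_lt_sub_left hp (Nat.lt_add_of_pos_right (pvRunLen_ge x (x.getD pos ' ') pos 1))

-- the body of B's second loop: the guarded lookahead at runs[k], runs[k+1], runs[k+2]
def pvEmit (ntail : Nat) (r1 : Char × Nat × Nat) (rest : List (Char × Nat × Nat)) :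
    List (Int × Int × Int × Int) :=
  match r1, rest with
  | (c1, s1, l1), (c2, _, l2) :: (c3, _, l3) :: _ =>
      if c1 = 'A' ∧ s1 < ntail ∧ c2 = 'H' ∧ c3 = 'A' then
        [((s1 : Int), (l1 : Int), (l2 : Int), (l3 : Int))]
      else []
  | _, _ => []

-- B's second loop over the run list
def pvScan (ntail : Nat) : List (Char × Nat × Nat) → List (Int × Int × Int × Int)
  | [] => []
  | r1 :: rest => pvEmit ntail r1 rest ++ pvScan ntail rest

def find_a_h_a_patterns_alt (tail : String) (head : String) : List (Int × Int × Int × Int) :=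
  pvScan tail.toList.length (pvRuns (tail.toList ++ head.toList) 0)

-- ===== PRECONDITION & SPEC =====
def Spec_find_a_h_a_patterns (tail : String) (head : String) (out : List (Int × Int × Int × Int)) : Prop := out = find_a_h_a_patterns_alt tail head
instance (tail : String) (head : String) (out : List (Int × Int × Int × Int)) : Decidable (Spec_find_a_h_a_patterns tail head out) := by unfold Spec_find_a_h_a_patterns; infer_instance

-- ===== CLAIM (what is proved, stated in full; the proofs are below) =====
def Claim_equal_find_a_h_a_patterns : Prop := ∀ (tail : String) (head : String), Dom_find_a_h_a_patterns tail head → Spec_find_a_h_a_patterns tail head (find_a_h_a_patterns tail head)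

-- ===== LEMMAS AND PROOFS =====

-- the run length measured by B is exactly the distance to the index where A's skip loop stops
theorem pvRunLen_skip (x : List Char) (c : Char) (pos : Nat) :
    ∀ rl, pos + pvRunLen x c pos rl = pvSkip c x (pos + rl) := by
  intro rl
  fun_induction pvRunLen with
  | case1 rl h ih =>
      conv_rhs => rw [pvSkip]
      rw [dif_pos h]
      exact ih
  | case2 rl h =>
      conv_rhs => rw [pvSkip]
      rw [dif_neg h]

theorem pvSkip_stop (c : Char) (x : List Char) (p : Nat)
    (h : ¬ (p < x.length ∧ x.getD p ' ' = c)) : pvSkip c x p = p := by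
  conv_lhs => rw [pvSkip]
  rw [dif_neg h]

-- unfolding pvRuns in terms of pvSkip
theorem pvRuns_eq (x : List Char) (p : Nat) (hp : p < x.length) :
    pvRuns x p = (x.getD p ' ', p, pvSkip (x.getD p ' ') x (p + 1) - p) ::
                 pvRuns x (pvSkip (x.getD p ' ') x (p + 1)) := by
  conv_lhs => rw [pvRuns]
  rw [dif_pos hp]
  have h := pvRunLen_skip x (x.getD p ' ') p 1
  have hge := pvSkip_ge (x.getD p ' ') x (p + 1)
  rw [← h]
  simp

theorem pvRuns_nil (x : List Char) (p : Nat) (hp : x.length ≤ p) : pvRuns x p = [] := by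
  conv_lhs => rw [pvRuns]
  rw [dif_neg (by omega)]

-- every run produced from position p starts at or after p
theorem pvRuns_start_ge (x : List Char) (p : Nat) :
    ∀ r ∈ pvRuns x p, p ≤ r.2.1 := by
  fun_induction pvRuns with
  | case1 p hp ih =>
      intro r hr
      rcases List.mem_cons.mp hr with h | h
      · subst h; simp
      · have := ih r h
        have := pvRunLen_ge x (x.getD p ' ') p 1
        omega
  | case2 p hp => intro r hr; simp at hr

theorem pvEmit_nil_of_not (ntail : Nat) (r1 : Char × Nat × Nat) (rest : List (Char × Nat × Nat))
    (h : ¬ (r1.1 = 'A' ∧ r1.2.1 < ntail)) : pvEmit ntail r1 rest = [] := by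
  obtain ⟨c1, s1, l1⟩ := r1
  match rest with
  | [] => rfl
  | [_] => rfl
  | (c2, s2, l2) :: (c3, s3, l3) :: rs =>
      simp only [pvEmit, ite_eq_right_iff]
      intro hc; exfalso; exact h ⟨hc.1, hc.2.1⟩

theorem pvScan_nil_of_ge (ntail : Nat) (rs : List (Char × Nat × Nat))
    (h : ∀ r ∈ rs, ntail ≤ r.2.1) : pvScan ntail rs = [] := by
  induction rs with
  | nil => rfl
  | cons r1 rest ih =>
      rw [pvScan]
      rw [pvEmit_nil_of_not _ _ _ (by have := h r1 (by simp); omega)]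
      simp only [List.nil_append]
      exact ih (fun r hr => h r (by simp [hr]))

-- main correspondence: A's loop from i computes B's scan over the runs from i
theorem loopA_eq_scan (x : List Char) (ntail : Nat) (hnt : ntail ≤ x.length) :
    ∀ i, pvLoopA x ntail i = pvScan ntail (pvRuns x i) := by
  intro i
  fun_induction pvLoopA with
  | case1 i hi hA ih =>
      -- x[i] ≠ 'A' : step i by 1
      have hil : i < x.length := by omega
      rw [ih, pvRuns_eq x i hil, pvScan,
          pvEmit_nil_of_not _ _ _ (fun hc => hA hc.1), List.nil_append]
      -- compare runs from i+1 with runs from the end of the partial run at i+1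
      by_cases hnext : i + 1 < x.length ∧ x.getD (i + 1) ' ' = x.getD i ' '
      · rw [pvRuns_eq x (i + 1) hnext.1, hnext.2, pvScan,
            pvEmit_nil_of_not _ _ _ (fun hc => hA hc.1), List.nil_append,
            pvSkip_step (x.getD i ' ') x (i + 1) hnext.1 hnext.2]
      · rw [pvSkip_stop _ _ _ hnext]
  | case2 i hi hA j hij k h hh0 ih =>
      -- x[i] = 'A', no following H run: neither side emits at the A run
      have hil : i < x.length := by omega
      have hcA : x.getD i ' ' = 'A' := not_not.mp hA
      have hj : j = pvSkip 'A' x i := rfl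
      have hk : k = pvSkip 'H' x j := rfl
      have hh0' : k - j = 0 := hh0
      have hjs : pvSkip 'A' x i = pvSkip 'A' x (i + 1) := pvSkip_step 'A' x i hil hcA
      have hrunsi : pvRuns x i = ('A', i, j - i) :: pvRuns x j := by
        rw [pvRuns_eq x i hil, hcA, ← hjs, ← hj]
      have hnotH : ¬ (j < x.length ∧ x.getD j ' ' = 'H') := by
        intro hcon
        have h1 : pvSkip 'H' x j = pvSkip 'H' x (j + 1) := pvSkip_step 'H' x j hcon.1 hcon.2
        have h2 := pvSkip_ge 'H' x (j + 1)
        have h3 := pvSkip_ge 'H' x j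
        omega
      have hemit : pvEmit ntail ('A', i, j - i) (pvRuns x j) = [] := by
        by_cases hjl : j < x.length
        · have hch : x.getD j ' ' ≠ 'H' := fun hc => hnotH ⟨hjl, hc⟩
          rw [pvRuns_eq x j hjl]
          match pvRuns x (pvSkip (x.getD j ' ') x (j + 1)) with
          | [] => rfl
          | r :: rs =>
              simp only [pvEmit]
              rw [if_neg (fun hc => hch hc.2.2.1)]
        · rw [pvRuns_nil x j (by omega)]; rfl
      rw [ih, hrunsi, pvScan, hemit, List.nil_append]
  | case3 i hi hA j hij a1 k h hh0 l a2 ih =>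
      -- x[i] = 'A', an H run follows
      have hil : i < x.length := by omega
      have hcA : x.getD i ' ' = 'A' := not_not.mp hA
      have hj : j = pvSkip 'A' x i := rfl
      have hk : k = pvSkip 'H' x j := rfl
      have hl : l = pvSkip 'A' x k := rfl
      have hh0' : k - j ≠ 0 := hh0
      have hjs : pvSkip 'A' x i = pvSkip 'A' x (i + 1) := pvSkip_step 'A' x i hil hcA
      -- j is inside, and x[j] = 'H'
      have hjH : j < x.length ∧ x.getD j ' ' = 'H' := by
        by_contra hcon
        have := pvSkip_stop 'H' x j hcon
        omega
      have hkj : j < k := by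
        have h1 := pvSkip_ge 'H' x (j + 1)
        have h2 := pvSkip_step 'H' x j hjH.1 hjH.2
        omega
      have hrunsi : pvRuns x i = ('A', i, j - i) :: pvRuns x j := by
        rw [pvRuns_eq x i hil, hcA, ← hjs, ← hj]
      have hrunsj : pvRuns x j = ('H', j, k - j) :: pvRuns x k := by
        rw [pvRuns_eq x j hjH.1, hjH.2, ← pvSkip_step 'H' x j hjH.1 hjH.2, ← hk]
      rw [ih, hrunsi, pvScan]
      congr 1
      rw [hrunsj]
      by_cases ha2 : 0 < a2
      · -- x[k] = 'A': the next run is an A run, the pattern is emitted by both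
        have ha2' : 0 < l - k := ha2
        have hkA : k < x.length ∧ x.getD k ' ' = 'A' := by
          by_contra hcon
          have := pvSkip_stop 'A' x k hcon
          omega
        have hrunsk : pvRuns x k = ('A', k, l - k) :: pvRuns x l := by
          rw [pvRuns_eq x k hkA.1, hkA.2, ← pvSkip_step 'A' x k hkA.1 hkA.2, ← hl]
        rw [if_pos ha2, hrunsk]
        simp only [pvEmit]
        rw [if_pos ⟨trivial, hi, trivial, trivial⟩]
      · -- x[k] ≠ 'A': no a2, neither side emits
        have ha2' : ¬ 0 < l - k := ha2
        rw [if_neg ha2]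
        by_cases hkl : k < x.length
        · have hck : x.getD k ' ' ≠ 'A' := by
            intro hc
            have h1 := pvSkip_ge 'A' x (k + 1)
            have h2 := pvSkip_step 'A' x k hkl hc
            omega
          rw [pvRuns_eq x k hkl]
          simp only [pvEmit]
          rw [if_neg (fun hc => hck hc.2.2.2)]
        · rw [pvRuns_nil x k (by omega)]; rfl
  | case4 i hi =>
      -- i ≥ ntail: all remaining runs start at or after ntail, so the scan is empty
      exact (pvScan_nil_of_ge ntail (pvRuns x i)
        (fun r hr => by have := pvRuns_start_ge x i r hr; omega)).symm

-- ===== VERDICT (by name: the statement is the Claim_ definition above) =====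
theorem find_a_h_a_patterns_spec : Claim_equal_find_a_h_a_patterns := by
  intro tail head _
  unfold Spec_find_a_h_a_patterns find_a_h_a_patterns find_a_h_a_patterns_alt
  exact loopA_eq_scan (tail.toList ++ head.toList) tail.toList.length (by simp) 0
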